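-- pv_equiv track=rewrite | github.com/YoonDosik/Codingtest_practice | programmars/level_1/과일 장수.py | solution
-- ===== SOURCE A (Python) =====
-- def solution(k, m, score):
--     score = sorted(score, reverse=True)
--
--     count = 0
--     for i in range(0, len(score), m):
--         result = score[i:i + m]
--         if len(result) == m:
--             count += (min(result) * m)
--
--     return count
-- ===== SOURCE B (Python) =====
-- def solution(k, m, score):
--     counts = {}
--     for v in score:
--         counts[v] = counts.get(v, 0) + 1
--     nboxes = len(score) // m
--     total = 0
--     p = 0
--     for v in sorted(counts, reverse=True):
--         q = p + counts[v]
--         total += m * v * max(0, min(q // m, nboxes) - p // m)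
--         p = q
--     return total
-- ===== Notes on version B (the rewrite author's own statement) =====
-- stated objective: alternative
-- what changed: B never sorts or scans the full score list: it builds a hash counter of values, sorts only the distinct values descending, and for each value's run [p,q) in the implicit sorted order adds m*v times the number of box minima falling in that run, computed arithmetically as min(q//m, len//m) - p//m.
import Mathlib
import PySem

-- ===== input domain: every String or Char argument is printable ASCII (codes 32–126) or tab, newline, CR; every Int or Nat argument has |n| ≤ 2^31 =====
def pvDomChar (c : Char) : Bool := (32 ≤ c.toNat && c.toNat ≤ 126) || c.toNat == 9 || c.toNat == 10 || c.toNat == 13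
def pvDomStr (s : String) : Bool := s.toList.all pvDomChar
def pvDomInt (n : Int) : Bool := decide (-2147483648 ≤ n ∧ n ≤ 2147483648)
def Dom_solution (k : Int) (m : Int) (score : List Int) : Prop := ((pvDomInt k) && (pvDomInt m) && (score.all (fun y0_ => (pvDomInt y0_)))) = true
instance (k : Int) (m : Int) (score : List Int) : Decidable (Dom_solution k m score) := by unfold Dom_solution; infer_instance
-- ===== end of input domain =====

-- B replaces A's sort-and-scan of the whole list by a hash counter of values plus arithmetic on value runs (objective: alternative).


-- ===== PORT A =====
-- min(result) would raise on an empty list, but the guard len(result) == m (with m ≠ 0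
-- from Pre_) makes it unreachable; .getD 0 only totalizes the unreachable branch.
def solution (k : Int) (m : Int) (score : List Int) : Int :=
  let s := PySem.List.sorted score (fun x => x) true
  (PySem.List.pyRange 0 (PySem.List.len s) m).foldl
    (fun count i =>
      let result := PySem.List.slice s (some i) (some (i + m))
      if ((result.length : Int) == m) then
        count + ((PySem.List.min? result (fun x => x)).getD 0) * m
      else count) 0

-- ===== PORT B =====
def solution_alt (k : Int) (m : Int) (score : List Int) : Int :=
  let counts := score.foldl (fun d v => d.insert v (d.getD v 0 + 1)) (PySem.Dict.empty (κ := Int) (ν := Int))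
  let nboxes := PySem.Int.floordiv (PySem.List.len score) m
  ((PySem.List.sorted (PySem.Dict.keys counts) (fun x => x) true).foldl
    (fun tp v =>
      let q := tp.2 + counts.getD v 0
      (tp.1 + m * v * max 0 (min (PySem.Int.floordiv q m) nboxes - PySem.Int.floordiv tp.2 m), q))
    ((0 : Int), (0 : Int))).1

-- ===== PRECONDITION & SPEC =====
-- Pre_ excludes only m = 0, where A raises ValueError (range step 0) and B raises ZeroDivisionError.
def Pre_solution (k : Int) (m : Int) (score : List Int) : Prop := m ≠ 0
instance (k : Int) (m : Int) (score : List Int) : Decidable (Pre_solution k m score) := by unfold Pre_solution; infer_instance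
def pvWitness_solution : Int × Int × List Int := (4, 3, [1, 2, 3, 1, 2, 3, 1])
def Spec_solution (k : Int) (m : Int) (score : List Int) (out : Int) : Prop := out = solution_alt k m score
instance (k : Int) (m : Int) (score : List Int) (out : Int) : Decidable (Spec_solution k m score out) := by unfold Spec_solution; infer_instance

-- ===== CLAIM (what is proved, stated in full; the proofs are below) =====
def Claim_equal_solution : Prop := ∀ (k : Int) (m : Int) (score : List Int), Dom_solution k m score → Pre_solution k m score → Spec_solution k m score (solution k m score)

-- ===== LEMMAS AND PROOFS =====

-- sum of s[j] over the box-minimum indices at or beyond position x (start rounded up to the next index ≡ m-1 mod m)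
def strideSum (s : List Int) (m x : Int) : Int :=
  ((PySem.List.pyRange (PySem.Int.floordiv x m * m + m - 1) ((s.length : Int)) m).map
    (fun j => PySem.List.pyGetD s j 0)).sum

-- range(a, b, m) with positive step m is empty when b ≤ a
lemma pyRange_pos_nil {m : Int} (a b : Int) (hm : 0 < m) (h : b ≤ a) :
    PySem.List.pyRange a b m = [] := by
  rw [PySem.List.pyRange_of_pos a b hm]
  simp [not_lt.mpr h]

-- range(a, b, m) with negative step m is empty when a ≤ b
lemma pyRange_neg_nil {m : Int} (a b : Int) (hm : m < 0) (h : a ≤ b) :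
    PySem.List.pyRange a b m = [] := by
  simp only [PySem.List.pyRange,
    if_neg (show ¬ m = 0 by omega),
    if_neg (show ¬ (0:Int) < m by omega),
    if_neg (show ¬ b < a by omega)]
  simp

-- positive-step cons unfolding of range
lemma pyRange_pos_cons {m : Int} (a b : Int) (hm : 0 < m) (h : a < b) :
    PySem.List.pyRange a b m = a :: PySem.List.pyRange (a + m) b m := by
  rw [PySem.List.pyRange_of_pos a b hm, PySem.List.pyRange_of_pos (a + m) b hm]
  have key : (b - a + m - 1) / m = (b - a - 1) / m + 1 := by
    have h1 : b - a + m - 1 = (b - a - 1) + 1 * m := by ring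
    rw [h1, Int.add_mul_ediv_right _ _ (by omega : m ≠ 0)]
  have hq0 : 0 ≤ (b - a - 1) / m := Int.ediv_nonneg (by omega) (by omega)
  have hreidx : b - (a + m) + m - 1 = b - a - 1 := by ring
  have hcount : (if a + m < b then ((b - (a + m) + m - 1) / m).toNat else 0)
      = ((b - a - 1) / m).toNat := by
    rw [hreidx]
    split_ifs with h2
    · rfl
    · rw [Int.ediv_eq_zero_of_lt (by omega) (by omega)]; rfl
  rw [if_pos h, hcount, key]
  have htn : ((b - a - 1) / m + 1).toNat = ((b - a - 1) / m).toNat + 1 := by omega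
  rw [htn, List.range_succ_eq_map, List.map_cons, List.map_map]
  refine congrArg₂ List.cons (by norm_num) ?_
  apply List.map_congr_left
  intro x _
  simp only [Function.comp]
  push_cast
  ring

-- in a weakly descending list the last element is a lower bound
lemma getLast_le_of_desc (l : List Int) (h : l.Pairwise (fun a b => b ≤ a)) (hne : l ≠ []) :
    ∀ x ∈ l, l.getLast hne ≤ x := by
  induction l with
  | nil => exact absurd rfl hne
  | cons y t ih =>
    intro x hx
    obtain ⟨hy, hp⟩ := List.pairwise_cons.mp h
    rcases eq_or_ne t [] with ht | ht
    · subst ht; simp at hx; simp [hx]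
    · rw [List.getLast_cons ht]
      rcases List.mem_cons.mp hx with rfl | hx
      · exact hy (t.getLast ht) (List.getLast_mem ht)
      · exact ih hp ht x hx

-- min of a weakly descending nonempty list is its last element (Python's min, first extremum)
lemma min?_of_desc (l : List Int) (h : l.Pairwise (fun a b => b ≤ a)) (hne : l ≠ []) :
    PySem.List.min? l (fun x => x) = some (l.getLast hne) := by
  rcases hmin : PySem.List.min? l (fun x => x) with _ | v
  · exact absurd ((PySem.List.min?_eq_none_iff l _).1 hmin) hne
  · have hmem := PySem.List.min?_mem hmin
    have hlb := PySem.List.min?_isMin hmin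
    have h1 : v ≤ l.getLast hne := hlb _ (List.getLast_mem hne)
    have h2 : l.getLast hne ≤ v := getLast_le_of_desc l h hne v hmem
    rw [le_antisymm h1 h2]

-- the A-side loop over boxes starting at a equals m times the strided tail sum
lemma loopA (m : Int) (hm : 0 < m) (s : List Int) (hs : s.Pairwise (fun a b => b ≤ a)) :
    ∀ (N : Nat) (a c : Int), 0 ≤ a → ((s.length : Int) - a).toNat ≤ N →
    (PySem.List.pyRange a (s.length : Int) m).foldl
      (fun count i =>
        let result := PySem.List.slice s (some i) (some (i + m))
        if ((result.length : Int) == m) then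
          count + ((PySem.List.min? result (fun x => x)).getD 0) * m
        else count) c
    = c + m * ((PySem.List.pyRange (a + m - 1) (s.length : Int) m).map
        (fun i => PySem.List.pyGetD s i 0)).sum := by
  intro N
  induction N with
  | zero =>
    intro a c ha hN
    have hge : (s.length : Int) ≤ a := by omega
    rw [pyRange_pos_nil a _ hm hge, pyRange_pos_nil (a + m - 1) _ hm (by omega)]
    simp
  | succ N ih =>
    intro a c ha hN
    rcases lt_or_ge a (s.length : Int) with hlt | hge
    · rw [pyRange_pos_cons a _ hm hlt]
      simp only [List.foldl_cons]
      have hsl : PySem.List.slice s (some a) (some (a + m))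
          = (s.drop a.toNat).take ((a + m).toNat - a.toNat) :=
        PySem.List.slice_toNat s ha (by omega)
      have htn : (a + m).toNat - a.toNat = m.toNat := by omega
      rcases lt_or_ge (a + m) ((s.length : Int) + 1) with hfull | hpart
      · have hfits : a + m ≤ (s.length : Int) := by omega
        have hlen : (PySem.List.slice s (some a) (some (a + m))).length = m.toNat := by
          rw [hsl, htn, List.length_take, List.length_drop]; omega
        have hcond : (((PySem.List.slice s (some a) (some (a + m))).length : Int) == m) = true := by
          rw [hlen]; simp; omega
        simp only [hcond, if_true]
        have hne : PySem.List.slice s (some a) (some (a + m)) ≠ [] := by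
          intro hnil; rw [hnil] at hlen; simp at hlen; omega
        have hdesc : (PySem.List.slice s (some a) (some (a + m))).Pairwise (fun a b => b ≤ a) := by
          rw [hsl]; exact List.Pairwise.take (List.Pairwise.drop hs)
        rw [min?_of_desc _ hdesc hne, Option.getD_some]
        have hidx : (a + m - 1).toNat < s.length := by omega
        have hlast : (PySem.List.slice s (some a) (some (a + m))).getLast hne
            = s[(a + m - 1).toNat] := by
          rw [List.getLast_eq_getElem, List.getElem_of_eq hsl]
          rw [List.getElem_take, List.getElem_drop]
          exact getElem_congr rfl (by omega) (by omega)
        rw [pyRange_pos_cons (a + m - 1) _ hm (by omega)]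
        rw [ih (a + m) _ (by omega) (by omega)]
        simp only [List.map_cons, List.sum_cons]
        rw [hlast, PySem.List.pyGetD_eq_getElem s 0 (by omega) (by omega)]
        have hsh : a + m + m - 1 = a + m - 1 + m := by ring
        rw [hsh]
        ring
      · have hlen : (PySem.List.slice s (some a) (some (a + m))).length = s.length - a.toNat := by
          rw [hsl, htn, List.length_take, List.length_drop]; omega
        have hcond : (((PySem.List.slice s (some a) (some (a + m))).length : Int) == m) = false := by
          rw [hlen]; simp; omega
        simp only [hcond, if_false, Bool.false_eq_true]
        rw [pyRange_pos_nil (a + m) _ hm (by omega), pyRange_pos_nil (a + m - 1) _ hm (by omega)]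
        simp
    · rw [pyRange_pos_nil a _ hm hge, pyRange_pos_nil (a + m - 1) _ hm (by omega)]
      simp

-- one run of equal values: the strided tail sum drops by v times the number of box minima inside [p, q)
lemma strideStep (s : List Int) (m : Int) (hm : 0 < m) (v p q : Int)
    (hp : 0 ≤ p) (hpq : p ≤ q) (hq : q ≤ (s.length : Int))
    (hv : ∀ j : Int, p ≤ j → j < q → PySem.List.pyGetD s j 0 = v) :
    strideSum s m p = v * (PySem.Int.floordiv q m - PySem.Int.floordiv p m) + strideSum s m q := by
  rw [PySem.Int.floordiv_eq_ediv_of_pos hm, PySem.Int.floordiv_eq_ediv_of_pos hm]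
  induction hN : (q / m - p / m).toNat generalizing p with
  | zero =>
    have hmono : p / m ≤ q / m := Int.ediv_le_ediv hm hpq
    have heq : p / m = q / m := by omega
    unfold strideSum
    rw [PySem.Int.floordiv_eq_ediv_of_pos hm, PySem.Int.floordiv_eq_ediv_of_pos hm, heq]
    ring
  | succ N ih =>
    have hmono : p / m ≤ q / m := Int.ediv_le_ediv hm hpq
    have hlt : p / m < q / m := by omega
    have h1 : p < (p / m + 1) * m := Int.lt_ediv_add_one_mul_self p hm
    have h1' : (p / m + 1) * m = p / m * m + m := by ring
    have h2 : (p / m + 1) * m ≤ q / m * m :=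
      mul_le_mul_of_nonneg_right (by omega) (le_of_lt hm)
    have h3 := Int.mul_ediv_add_emod q m
    have h4 := Int.emod_nonneg q (ne_of_gt hm)
    have h3' : m * (q / m) = q / m * m := by ring
    -- a: the first box-minimum index ≥ p
    have hple : p ≤ p / m * m + m - 1 := by omega
    have haq : p / m * m + m - 1 < q := by omega
    have hp'div : (p / m + 1) * m / m = p / m + 1 := Int.mul_ediv_cancel _ (ne_of_gt hm)
    have hstride : strideSum s m p
        = PySem.List.pyGetD s (p / m * m + m - 1) 0 + strideSum s m ((p / m + 1) * m) := by
      unfold strideSum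
      rw [PySem.Int.floordiv_eq_ediv_of_pos hm, PySem.Int.floordiv_eq_ediv_of_pos hm, hp'div]
      rw [pyRange_pos_cons _ _ hm (by omega)]
      have hsh : p / m * m + m - 1 + m = (p / m + 1) * m + m - 1 := by ring
      rw [List.map_cons, List.sum_cons, hsh]
    have hrec := ih ((p / m + 1) * m) (by omega) (by omega)
      (fun j hj1 hj2 => hv j (by omega) hj2) (by rw [hp'div]; omega)
    rw [hstride, hv _ hple haq, hrec, hp'div]
    ring

-- the B-side fold over the remaining runs, positive m
lemma loopB (score s : List Int) (m : Int) (hm : 0 < m) (hlen : s.length = score.length) :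
    ∀ (K : List Int) (p : Nat) (t : Int),
      p ≤ s.length →
      List.drop p s = K.flatMap (fun v => List.replicate (score.count v) v) →
      (K.foldl
        (fun tp v =>
          (tp.1 + m * v * max 0 (min (PySem.Int.floordiv (tp.2 + ((score.count v : Int))) m)
              (PySem.Int.floordiv ((score.length : Int)) m) - PySem.Int.floordiv tp.2 m),
           tp.2 + ((score.count v : Int))))
        (t, (p : Int))).1
      = t + m * strideSum s m (p : Int) := by
  intro K
  induction K with
  | nil =>
    intro p t hp hdrop
    simp only [List.flatMap_nil] at hdrop
    have hge : s.length ≤ p := by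
      have := List.drop_eq_nil_iff.mp hdrop; omega
    have h1 : (p : Int) < ((p : Int) / m + 1) * m := Int.lt_ediv_add_one_mul_self _ hm
    have h1' : ((p : Int) / m + 1) * m = (p : Int) / m * m + m := by ring
    have hstart : (s.length : Int) ≤ (p : Int) / m * m + m - 1 := by omega
    simp only [List.foldl_nil]
    unfold strideSum
    rw [PySem.Int.floordiv_eq_ediv_of_pos hm, pyRange_pos_nil _ _ hm hstart]
    simp
  | cons v rest ih =>
    intro p t hp hdrop
    have hdl : (List.drop p s).length = s.length - p := List.length_drop ..
    simp only [List.flatMap_cons] at hdrop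
    have hlenc : s.length - p = score.count v + (rest.flatMap (fun v => List.replicate (score.count v) v)).length := by
      rw [← hdl, hdrop]; simp
    have hqn : p + score.count v ≤ s.length := by omega
    have hdropq : List.drop (p + score.count v) s = rest.flatMap (fun v => List.replicate (score.count v) v) := by
      rw [← List.drop_drop (i := score.count v) (j := p), hdrop, List.drop_left' (by simp)]
    have hv : ∀ j : Int, (p : Int) ≤ j → j < ((p + score.count v : Nat) : Int) → PySem.List.pyGetD s j 0 = v := by
      intro j hj1 hj2
      have hp0 : (0 : Int) ≤ (p : Int) := Int.natCast_nonneg p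
      have hj0 : 0 ≤ j := by omega
      have hjb : p ≤ j.toNat ∧ j.toNat < p + score.count v := by
        constructor <;> [skip; skip] <;> omega
      have hnat : j.toNat < s.length := by omega
      have hdlt : j.toNat - p < (List.drop p s).length := by rw [hdl]; omega
      rw [PySem.List.pyGetD_eq_getElem s 0 hj0 (by push_cast; omega)]
      have e1 : (List.drop p s)[j.toNat - p]'hdlt = s[j.toNat]'hnat := by
        rw [List.getElem_drop]
        exact getElem_congr rfl (by omega) (by omega)
      rw [← e1, List.getElem_of_eq hdrop hdlt,
        List.getElem_append_left (by simp; omega), List.getElem_replicate]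
    have hmono : (p : Int) / m ≤ ((p + score.count v : Nat) : Int) / m :=
      Int.ediv_le_ediv hm (by push_cast; omega)
    have hqle : ((p + score.count v : Nat) : Int) / m ≤ ((score.length : Int)) / m :=
      Int.ediv_le_ediv hm (by push_cast; omega)
    have hstep := strideStep s m hm v (p : Int) ((p + score.count v : Nat) : Int) (by positivity)
      (by push_cast; omega) (by omega) hv
    rw [PySem.Int.floordiv_eq_ediv_of_pos hm, PySem.Int.floordiv_eq_ediv_of_pos hm] at hstep
    simp only [List.foldl_cons]
    have hpair : ((t + m * v * max 0 (min (PySem.Int.floordiv ((p : Int) + ((score.count v : Nat) : Int)) m)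
            (PySem.Int.floordiv ((score.length : Int)) m) - PySem.Int.floordiv (p : Int) m),
          (p : Int) + ((score.count v : Nat) : Int)) : Int × Int)
        = (t + m * v * (((p + score.count v : Nat) : Int) / m - (p : Int) / m), ((p + score.count v : Nat) : Int)) := by
      have hcast : (p : Int) + ((score.count v : Nat) : Int) = ((p + score.count v : Nat) : Int) := by push_cast; ring
      rw [hcast, PySem.Int.floordiv_eq_ediv_of_pos hm, PySem.Int.floordiv_eq_ediv_of_pos hm,
        PySem.Int.floordiv_eq_ediv_of_pos hm]
      rw [min_eq_left hqle, max_eq_right (by omega)]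
    rw [hpair, ih (p + score.count v) _ hqn hdropq, hstep]
    ring

-- floor division by a negative divisor is antitone in the dividend
lemma floordiv_anti {m : Int} (hm : m < 0) {a b : Int} (h : a ≤ b) :
    PySem.Int.floordiv b m ≤ PySem.Int.floordiv a m := by
  have ea : PySem.Int.floordiv a m = PySem.Int.floordiv (-a) (-m) := by
    rw [← PySem.Int.floordiv_neg_neg (-a) (-m), neg_neg, neg_neg]
  have eb : PySem.Int.floordiv b m = PySem.Int.floordiv (-b) (-m) := by
    rw [← PySem.Int.floordiv_neg_neg (-b) (-m), neg_neg, neg_neg]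
  rw [ea, eb, PySem.Int.floordiv_eq_ediv_of_pos (by omega), PySem.Int.floordiv_eq_ediv_of_pos (by omega)]
  exact Int.ediv_le_ediv (by omega) (by omega)

-- the B-side fold adds nothing when m is negative
lemma loopBneg (score : List Int) (m : Int) (hm : m < 0) :
    ∀ (K : List Int) (p t : Int),
      (K.foldl
        (fun tp v =>
          (tp.1 + m * v * max 0 (min (PySem.Int.floordiv (tp.2 + ((score.count v : Int))) m)
              (PySem.Int.floordiv ((score.length : Int)) m) - PySem.Int.floordiv tp.2 m),
           tp.2 + ((score.count v : Int))))
        (t, p)).1 = t := by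
  intro K
  induction K with
  | nil => intro p t; rfl
  | cons v rest ih =>
    intro p t
    simp only [List.foldl_cons]
    have h1 : PySem.Int.floordiv (p + ((score.count v : Int))) m ≤ PySem.Int.floordiv p m :=
      floordiv_anti hm (by have := Int.natCast_nonneg (score.count v); omega)
    have hmax : max 0 (min (PySem.Int.floordiv (p + ((score.count v : Int))) m)
        (PySem.Int.floordiv ((score.length : Int)) m) - PySem.Int.floordiv p m) = 0 :=
      max_eq_left (by
        have h2 := min_le_left (PySem.Int.floordiv (p + ((score.count v : Int))) m)
          (PySem.Int.floordiv ((score.length : Int)) m)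
        omega)
    rw [hmax]
    simpa using ih (p + ((score.count v : Int))) (t + m * v * 0)

-- counting inside a concatenation of runs over distinct values
lemma count_flatMap_replicate (K : List Int) (c : Int → Nat) (a : Int) (hK : K.Nodup) :
    (K.flatMap (fun v => List.replicate (c v) v)).count a = if a ∈ K then c a else 0 := by
  induction K with
  | nil => simp
  | cons v rest ih =>
    simp only [List.flatMap_cons, List.count_append, List.count_replicate]
    rw [ih (List.nodup_cons.mp hK).2]
    rcases eq_or_ne v a with rfl | hne
    · have hnm : v ∉ rest := (List.nodup_cons.mp hK).1
      simp [hnm]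
    · simp only [beq_eq_false_iff_ne.mpr hne, List.mem_cons]
      simp only [Bool.false_eq_true, if_false, zero_add]
      rw [if_congr (iff_of_eq (propext (or_iff_right (show ¬(a = v) from fun h => hne h.symm)))) rfl rfl]
lemma flatMap_replicate_pairwise (K : List Int) (c : Int → Nat)
    (hd : K.Pairwise (fun a b => b < a)) :
    (K.flatMap (fun v => List.replicate (c v) v)).Pairwise (fun a b => b ≤ a) := by
  induction K with
  | nil => simp
  | cons v rest ih =>
    simp only [List.flatMap_cons]
    rw [List.pairwise_append]
    refine ⟨List.pairwise_replicate.mpr (Or.inr le_rfl), ih (List.pairwise_cons.mp hd).2, ?_⟩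
    intro x hx y hy
    have hxv : x = v := List.eq_of_mem_replicate hx
    obtain ⟨w, hw, hyw⟩ := List.mem_flatMap.mp hy
    have hyw' : y = w := List.eq_of_mem_replicate hyw
    have := (List.pairwise_cons.mp hd).1 w hw
    omega

lemma sorted_rev_eq_flatMap (score : List Int) :
    PySem.List.sorted score (fun x => x) true
      = (PySem.List.sorted (PySem.Set.ofList score) (fun x => x) true).flatMap
          (fun v => List.replicate (score.count v) v) := by
  set K := PySem.List.sorted (PySem.Set.ofList score) (fun x => x) true with hKdef
  have hKperm : K.Perm (PySem.Set.ofList score) := PySem.List.sorted_perm ..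
  have hKnodup : K.Nodup := hKperm.nodup_iff.mpr (PySem.Set.nodup_ofList score)
  have hKmem : ∀ a, a ∈ K ↔ a ∈ score := by
    intro a
    rw [PySem.List.mem_sorted, PySem.Set.mem_ofList]
  have hKdesc : K.Pairwise (fun a b => b < a) := by
    have h1 := PySem.List.sorted_pairwise_rev (PySem.Set.ofList score) (fun x : Int => x)
    have h2 : K.Pairwise (fun a b => a ≠ b) := hKnodup
    exact (h1.and h2).imp (fun h => lt_of_le_of_ne h.1 h.2.symm)
  have hperm : (K.flatMap (fun v => List.replicate (score.count v) v)).Perm score := by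
    rw [List.perm_iff_count]
    intro a
    rw [count_flatMap_replicate K _ a hKnodup]
    split_ifs with h
    · rfl
    · exact (List.count_eq_zero.mpr (fun hmem => h ((hKmem a).mpr hmem))).symm
  have hsorted1 : (PySem.List.sorted score (fun x => x) true).Pairwise (fun a b : Int => b ≤ a) :=
    PySem.List.sorted_pairwise_rev ..
  have hsorted2 : (K.flatMap (fun v => List.replicate (score.count v) v)).Pairwise
      (fun a b : Int => b ≤ a) := flatMap_replicate_pairwise K _ hKdesc
  refine List.eq_of_perm_of_sorted (fun a b _ _ h1 h2 => le_antisymm h2 h1) hsorted1 hsorted2 ?_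
  exact (PySem.List.sorted_perm ..).trans hperm.symm

-- ===== VERDICT (by name: the statement is the Claim_ definition above) =====
theorem solution_spec : Claim_equal_solution := by
  intro k m score _ hpre
  unfold Spec_solution solution solution_alt Pre_solution at *
  simp only [PySem.List.len_eq, PySem.Dict.foldl_insert_getD_add_one_eq_counter,
    PySem.Dict.getD_counter, PySem.Dict.keys_counter]
  set s := PySem.List.sorted score (fun x => x) true with hs
  have hslen : s.length = score.length := by rw [hs]; exact PySem.List.length_sorted ..
  rcases lt_or_gt_of_ne hpre with hneg | hpos
  · rw [pyRange_neg_nil 0 _ hneg (by positivity)]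
    simp only [List.foldl_nil]
    exact (loopBneg score m hneg _ 0 0).symm
  · rw [loopA m hpos s (PySem.List.sorted_pairwise_rev score (fun x => x))
        s.length 0 0 le_rfl (by omega)]
    have hB := loopB score s m hpos hslen _ 0 0 (Nat.zero_le _)
      (by simpa using sorted_rev_eq_flatMap score)
    simp only [Nat.cast_zero] at hB
    rw [hB]
    unfold strideSum
    rw [PySem.Int.floordiv_eq_ediv_of_pos hpos, Int.zero_ediv]
    norm_num
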